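-- pv_equiv track=rewrite | github.com/yuanyao366/douma_algo_training_camp | src/com/douma/written_test/huawei/_20210830/_2_ReverseString.py | trim_bar
-- ===== SOURCE A (Python) =====
-- def trim_bar(s, n):
--     i, output = 0, []
--     while i < n:
--         if s[i] == '-':
--             cnt = 0
--             while i < n and s[i] == '-':
--                 cnt, i = cnt + 1, i + 1
--             if cnt >= 2:
--                 output.append(' ')
--             else:
--                 output.append(s[i - 1])
--         else:
--             output.append(s[i])
--             i += 1
--     return output
-- ===== SOURCE B (Python) =====
-- def trim_bar(s, n):
--     # Two-pass: run-length-encode the first n characters, then map each run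
--     # to its output (dash runs collapse to ' ' or '-', other runs expand).
--     chars = [s[i] for i in range(n)]
--     runs = []
--     for c in chars:
--         if runs and runs[-1][0] == c:
--             runs[-1] = (c, runs[-1][1] + 1)
--         else:
--             runs.append((c, 1))
--     out = []
--     for c, k in runs:
--         if c == '-':
--             out.append(' ' if k >= 2 else '-')
--         else:
--             out.extend([c] * k)
--     return out
-- ===== Notes on version B (the rewrite author's own statement) =====
-- stated objective: alternative
-- what changed: A's single pass with a manual inner dash-counting while-loop is replaced by a two-pass pipeline: run-length-encode the first n characters, then map each run to its output (dash runs collapse to ' ' or '-', other runs expand).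
import Mathlib
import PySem

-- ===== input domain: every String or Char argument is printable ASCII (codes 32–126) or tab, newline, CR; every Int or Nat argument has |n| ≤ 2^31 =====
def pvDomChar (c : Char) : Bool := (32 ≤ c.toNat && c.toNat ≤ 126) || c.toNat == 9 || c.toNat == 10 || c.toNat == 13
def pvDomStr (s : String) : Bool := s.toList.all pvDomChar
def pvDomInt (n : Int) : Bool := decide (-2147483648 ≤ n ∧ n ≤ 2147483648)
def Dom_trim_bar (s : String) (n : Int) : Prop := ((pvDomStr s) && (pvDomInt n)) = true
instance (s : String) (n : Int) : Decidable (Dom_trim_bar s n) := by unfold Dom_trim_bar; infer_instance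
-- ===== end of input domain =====

-- B re-implements A as a two-pass run-length-encode-then-map pipeline (alternative decomposition,
-- same asymptotic cost); equivalence is proved for all n ≤ len(s) (A raises IndexError otherwise).


-- ===== PORT A =====
-- inner while: 'while i < n and s[i] == '-': cnt, i = cnt + 1, i + 1'
-- (fuel = an upper bound on the remaining iterations n - i; callers always pass enough,
--  so the 0-fuel branch is never the loop's exit on admitted inputs)
def pvDashLoop (cs : List Char) (n : Int) : Nat → Int → Int → Int × Int
  | 0, i, cnt => (cnt, i)
  | fuel + 1, i, cnt =>
    if i < n ∧ PySem.List.pyGet? cs i = some '-' then pvDashLoop cs n fuel (i + 1) (cnt + 1)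
    else (cnt, i)

-- outer while of A (same fuel discipline: each iteration advances i by at least 1)
def pvTrimLoop (cs : List Char) (n : Int) : Nat → Int → List String → List String
  | 0, _, output => output
  | fuel + 1, i, output =>
    if i < n then
      match PySem.List.pyGet? cs i with
      | none => output   -- IndexError in Python (excluded by Pre_)
      | some c =>
        if c = '-' then
          let p := pvDashLoop cs n (fuel + 1) i 0
          pvTrimLoop cs n fuel p.2
            (output ++ [if p.1 ≥ 2 then " "
                        else (match PySem.List.pyGet? cs (p.2 - 1) with
                              | some d => String.mk [d]
                              | none => "")])
        else pvTrimLoop cs n fuel (i + 1) (output ++ [String.mk [c]])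
    else output

def trim_bar (s : String) (n : Int) : List String := pvTrimLoop s.toList n n.toNat 0 []

-- ===== PORT B =====
-- run building: Source B appends a new run / bumps the last run; transcribed as a cons-based
-- accumulator (newest run at the head) reversed at the end.
def pvStep (rs : List (Char × Int)) (c : Char) : List (Char × Int) :=
  match rs with
  | (c0, k) :: t => if c0 = c then (c0, k + 1) :: t else (c, 1) :: (c0, k) :: t
  | [] => [(c, 1)]

def trim_bar_alt (s : String) (n : Int) : List String :=
  let cs := s.toList
  -- chars = [s[i] for i in range(n)]  (in-range on Pre_, where the comprehension does not raise)
  let chars := (PySem.List.pyRange 0 n 1).map (fun i => PySem.List.pyGetD cs i ' ')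
  let runs := (chars.foldl pvStep []).reverse
  runs.foldl
    (fun out ck =>
      out ++ (if ck.1 = '-' then [if ck.2 ≥ 2 then " " else "-"]
              else List.replicate ck.2.toNat (String.mk [ck.1]))) []

-- ===== PRECONDITION & SPEC =====
-- Pre_ excludes exactly the inputs with n > len(s), on which A (s[i]) raises IndexError.
def Pre_trim_bar (s : String) (n : Int) : Prop := n ≤ (s.toList.length : Int)
instance (s : String) (n : Int) : Decidable (Pre_trim_bar s n) := by unfold Pre_trim_bar; infer_instance
def pvWitness_trim_bar : String × Int := ("a--b-c", 6)

def Spec_trim_bar (s : String) (n : Int) (out : List String) : Prop := out = trim_bar_alt s n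
instance (s : String) (n : Int) (out : List String) : Decidable (Spec_trim_bar s n out) := by unfold Spec_trim_bar; infer_instance

-- ===== CLAIM (what is proved, stated in full; the proofs are below) =====
def Claim_equal_trim_bar : Prop := ∀ (s : String) (n : Int), Dom_trim_bar s n → Pre_trim_bar s n → Spec_trim_bar s n (trim_bar s n)

-- ===== LEMMAS AND PROOFS =====

-- reference: run-collapse on a plain character list
def pvCollapse : List Char → List String
  | [] => []
  | c :: rest =>
    if c = '-' then
      (if (rest.takeWhile (fun x => x == '-')).length + 1 ≥ 2 then [" "] else ["-"])
        ++ pvCollapse (rest.dropWhile (fun x => x == '-'))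
    else String.mk [c] :: pvCollapse rest
termination_by l => l.length
decreasing_by
  · have := List.length_dropWhile_le (fun x => x == '-') rest
    simp; omega
  · simp

theorem pvCollapse_nil : pvCollapse [] = [] := by rw [pvCollapse]

theorem pvCollapse_cons (c : Char) (rest : List Char) :
    pvCollapse (c :: rest) =
      if c = '-' then
        (if (rest.takeWhile (fun x => x == '-')).length + 1 ≥ 2 then [" "] else ["-"])
          ++ pvCollapse (rest.dropWhile (fun x => x == '-'))
      else String.mk [c] :: pvCollapse rest := by
  rw [pvCollapse]

-- recursive run-length encoding (reference for B's foldl)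
def pvRle : List Char → List (Char × Int)
  | [] => []
  | c :: r => (c, 1 + ((r.takeWhile (fun x => x == c)).length : Int)) :: pvRle (r.dropWhile (fun x => x == c))
termination_by l => l.length
decreasing_by
  have := List.length_dropWhile_le (fun x => x == c) r
  simp; omega

theorem pvRle_nil : pvRle [] = [] := by rw [pvRle]
theorem pvRle_cons (c : Char) (r : List Char) :
    pvRle (c :: r) = (c, 1 + ((r.takeWhile (fun x => x == c)).length : Int)) :: pvRle (r.dropWhile (fun x => x == c)) := by
  rw [pvRle]

-- the chars comprehension is take n (under Pre_)
theorem pvChars_eq (cs : List Char) (n : Int) (h : n ≤ (cs.length : Int)) :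
    (PySem.List.pyRange 0 n 1).map (fun i => PySem.List.pyGetD cs i ' ') = cs.take n.toNat := by
  rw [PySem.List.pyRange_one]
  simp only [List.map_map]
  apply List.ext_getElem
  · simp
    omega
  · intro k h1 h2
    simp only [List.getElem_map, List.getElem_range, Function.comp_apply]
    have hk : k < cs.length := by simp at h1; omega
    simp [PySem.List.pyGetD_natCast, List.getD_eq_getElem?_getD, List.getElem?_eq_getElem hk]

-- the head run of c is absorbed into an accumulator headed by (c, k)
theorem pvAbsorb (l : List Char) : ∀ (c : Char) (k : Int) (t : List (Char × Int)),
    l.foldl pvStep ((c, k) :: t)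
      = (l.dropWhile (fun x => x == c)).foldl pvStep ((c, k + ((l.takeWhile (fun x => x == c)).length : Int)) :: t) := by
  induction l with
  | nil => intro c k t; simp
  | cons a l ih =>
    intro c k t
    by_cases hac : a = c
    · subst hac
      simp only [List.foldl_cons, pvStep, if_pos rfl, List.takeWhile_cons, List.dropWhile_cons,
        beq_self_eq_true, if_true]
      rw [ih]
      congr 2
      simp only [List.length_cons, Prod.mk.injEq]
      push_cast
      refine ⟨trivial, by omega⟩
    · have hb : (a == c) = false := by simp [hac]
      have hca : ¬ c = a := fun h => hac h.symm
      simp only [List.foldl_cons, List.takeWhile_cons, List.dropWhile_cons, hb]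
      simp [pvStep, hca]

theorem pvFresh : ∀ (m : Nat) (l : List Char), l.length ≤ m → ∀ (c : Char) (t : List (Char × Int)),
    (l.foldl pvStep ((c, 1) :: t)).reverse
      = t.reverse ++ (c, 1 + ((l.takeWhile (fun x => x == c)).length : Int)) :: pvRle (l.dropWhile (fun x => x == c)) := by
  intro m
  induction m with
  | zero =>
    intro l hl c t
    have : l = [] := List.eq_nil_of_length_eq_zero (by omega)
    subst this
    simp [pvRle_nil]
  | succ m ih =>
    intro l hl c t
    rw [pvAbsorb]
    rcases hld : l.dropWhile (fun x => x == c) with _ | ⟨c', r'⟩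
    · simp [pvRle_nil]
    · have hne : c' ≠ c := by
        have h := List.head_dropWhile_not (fun x => x == c) (l := l) (by rw [hld]; simp)
        simp only [hld, List.head_cons] at h
        simpa using h
      have hr' : r'.length ≤ m := by
        have h1 := List.length_dropWhile_le (fun x => x == c) l
        rw [hld] at h1
        simp at h1
        omega
      simp only [List.foldl_cons]
      have hstep : pvStep ((c, 1 + ((l.takeWhile (fun x => x == c)).length : Int)) :: t) c'
          = (c', 1) :: (c, 1 + ((l.takeWhile (fun x => x == c)).length : Int)) :: t := by
        have hcc : ¬ c = c' := fun h => hne h.symm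
        simp [pvStep, hcc]
      rw [hstep, ih r' hr' c' _, pvRle_cons]
      simp

theorem pvRuns_eq (l : List Char) : (l.foldl pvStep []).reverse = pvRle l := by
  cases l with
  | nil => simp [pvRle_nil]
  | cons c r =>
    simp only [List.foldl_cons]
    have hstep : pvStep [] c = [(c, 1)] := by simp [pvStep]
    rw [hstep, pvFresh r.length r le_rfl c [], pvRle_cons]
    simp

-- the per-run output of Source B's second loop
def pvEmit (ck : Char × Int) : List String :=
  if ck.1 = '-' then [if ck.2 ≥ 2 then " " else "-"] else List.replicate ck.2.toNat (String.mk [ck.1])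

theorem pvFoldlEmit (rs : List (Char × Int)) : ∀ (out : List String),
    rs.foldl (fun out ck => out ++ pvEmit ck) out = out ++ (rs.map pvEmit).flatten := by
  induction rs with
  | nil => intro out; simp
  | cons ck rs ih => intro out; simp [ih]

-- a non-dash char emits itself once; run-grouped emission agrees with char-at-a-time
theorem pvSpread : ∀ (m : Nat) (l : List Char), l.length ≤ m → ∀ (c : Char), ¬ c = '-' →
    pvCollapse (c :: l)
      = List.replicate ((l.takeWhile (fun x => x == c)).length + 1) (String.mk [c])
          ++ pvCollapse (l.dropWhile (fun x => x == c)) := by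
  intro m
  induction m with
  | zero =>
    intro l hl c hc
    have : l = [] := List.eq_nil_of_length_eq_zero (by omega)
    subst this
    simp [pvCollapse_cons, hc]
  | succ m ih =>
    intro l hl c hc
    rw [pvCollapse_cons, if_neg hc]
    rcases l with _ | ⟨a, r⟩
    · simp
    · by_cases hac : a = c
      · subst hac
        rw [ih r (by simp at hl; omega) a hc]
        simp [List.takeWhile_cons, List.dropWhile_cons, List.replicate_succ]
      · have hb : (a == c) = false := by simp [hac]
        simp [List.takeWhile_cons, List.dropWhile_cons, hb]

theorem pvEmitRle : ∀ (m : Nat) (l : List Char), l.length ≤ m →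
    ((pvRle l).map pvEmit).flatten = pvCollapse l := by
  intro m
  induction m with
  | zero =>
    intro l hl
    have : l = [] := List.eq_nil_of_length_eq_zero (by omega)
    subst this
    simp [pvRle_nil, pvCollapse_nil]
  | succ m ih =>
    intro l hl
    rcases l with _ | ⟨c, r⟩
    · simp [pvRle_nil, pvCollapse_nil]
    · rw [pvRle_cons]
      have hr : (r.dropWhile (fun x => x == c)).length ≤ m := by
        have := List.length_dropWhile_le (fun x => x == c) r
        simp at hl
        omega
      by_cases hc : c = '-'
      · subst hc
        rw [pvCollapse_cons, if_pos rfl]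
        simp only [List.map_cons, List.flatten_cons, ih _ hr, pvEmit, if_pos rfl]
        congr 1
        split_ifs <;> first | rfl | (exfalso; omega)
      · simp only [List.map_cons, List.flatten_cons, ih _ hr, pvEmit, if_neg hc]
        rw [pvSpread r.length r le_rfl c hc]
        congr 1
        congr 1
        omega

-- B computes pvCollapse of the first n characters
theorem pvAltEq (s : String) (n : Int) (h : n ≤ (s.toList.length : Int)) :
    trim_bar_alt s n = pvCollapse (s.toList.take n.toNat) := by
  show ((((PySem.List.pyRange 0 n 1).map (fun i => PySem.List.pyGetD s.toList i ' ')).foldl pvStep []).reverse).foldl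
      (fun out ck => out ++ (if ck.1 = '-' then [if ck.2 ≥ 2 then " " else "-"]
              else List.replicate ck.2.toNat (String.mk [ck.1]))) [] = _
  rw [pvChars_eq s.toList n h, pvRuns_eq]
  have : (fun (out : List String) (ck : Char × Int) => out ++ (if ck.1 = '-' then [if ck.2 ≥ 2 then " " else "-"]
              else List.replicate ck.2.toNat (String.mk [ck.1]))) = fun out ck => out ++ pvEmit ck := by
    funext out ck
    rfl
  rw [this, pvFoldlEmit, pvEmitRle (s.toList.take n.toNat).length _ le_rfl]
  simp

-- the slice of cs that A's loop still has to process, as a list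
def pvRem (cs : List Char) (n i : Int) : List Char := (cs.take n.toNat).drop i.toNat

theorem pvRem_nil (cs : List Char) (n i : Int) (h0 : 0 ≤ i) (h : ¬ i < n) :
    pvRem cs n i = [] := by
  unfold pvRem
  apply List.drop_eq_nil_iff.mpr
  simp
  omega

theorem pvRem_cons (cs : List Char) (n i : Int) (h0 : 0 ≤ i) (hlt : i < n)
    (hlen : n ≤ (cs.length : Int)) :
    pvRem cs n i = cs[i.toNat]'(by omega) :: pvRem cs n (i + 1) := by
  unfold pvRem
  have hi : i.toNat < (cs.take n.toNat).length := by simp; omega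
  rw [List.drop_eq_getElem_cons hi, List.getElem_take]
  have h1 : (i + 1).toNat = i.toNat + 1 := by omega
  rw [h1]

theorem pvGet_rem (cs : List Char) (n i : Int) (h0 : 0 ≤ i) (hlt : i < n)
    (hlen : n ≤ (cs.length : Int)) :
    PySem.List.pyGet? cs i = some (cs[i.toNat]'(by omega)) :=
  PySem.List.pyGet?_eq_some_getElem cs h0 (by omega)

theorem pvDropWhile_eq_drop {α : Type} (p : α → Bool) (l : List α) :
    l.dropWhile p = l.drop (l.takeWhile p).length := by
  induction l with
  | nil => simp
  | cons a l ih =>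
    by_cases h : p a
    · simp [List.dropWhile_cons_of_pos h, List.takeWhile_cons_of_pos h, ih]
    · rw [List.dropWhile_cons_of_neg (by simpa using h), List.takeWhile_cons_of_neg (by simpa using h)]
      simp

-- the inner dash loop consumes exactly the leading dash run of the remaining slice
theorem pvDashSpec : ∀ (fuel : Nat) (cs : List Char) (n i cnt : Int), (n - i).toNat ≤ fuel →
    0 ≤ i → n ≤ (cs.length : Int) →
    pvDashLoop cs n fuel i cnt
      = (cnt + (((pvRem cs n i).takeWhile (fun x => x == '-')).length : Int),
         i + (((pvRem cs n i).takeWhile (fun x => x == '-')).length : Int)) := by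
  intro fuel
  induction fuel with
  | zero =>
    intro cs n i cnt hm h0 hlen
    have hni : ¬ i < n := by omega
    rw [pvDashLoop, pvRem_nil cs n i h0 hni]
    simp
  | succ m ih =>
    intro cs n i cnt hm h0 hlen
    by_cases hlt : i < n
    · have hrem := pvRem_cons cs n i h0 hlt hlen
      have hget := pvGet_rem cs n i h0 hlt hlen
      by_cases hdash : cs[i.toNat]'(by omega) = '-'
      · rw [pvDashLoop, if_pos ⟨hlt, by rw [hget, hdash]⟩,
          ih cs n (i + 1) (cnt + 1) (by omega) (by omega) hlen, hrem]
        rw [List.takeWhile_cons_of_pos (by simp [hdash])]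
        simp only [List.length_cons, Prod.mk.injEq]
        omega
      · rw [pvDashLoop, if_neg (by
          intro h
          rw [hget] at h
          exact hdash (by simpa using h.2)), hrem]
        rw [List.takeWhile_cons_of_neg (by simp [hdash])]
        simp
    · rw [pvDashLoop, if_neg (by intro h; exact hlt h.1), pvRem_nil cs n i h0 hlt]
      simp

-- one unfolding step of the outer loop when s[i] is in range
theorem pvTrimLoop_some (cs : List Char) (n i : Int) (fuel : Nat) (out : List String) (c : Char)
    (hlt : i < n) (hget : PySem.List.pyGet? cs i = some c) :
    pvTrimLoop cs n (fuel + 1) i out =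
      if _hd : c = '-' then
        pvTrimLoop cs n fuel (pvDashLoop cs n (fuel + 1) i 0).2
          (out ++ [if (pvDashLoop cs n (fuel + 1) i 0).1 ≥ 2 then " "
                   else (match PySem.List.pyGet? cs ((pvDashLoop cs n (fuel + 1) i 0).2 - 1) with
                         | some d => String.mk [d]
                         | none => "")])
      else pvTrimLoop cs n fuel (i + 1) (out ++ [String.mk [c]]) := by
  rw [pvTrimLoop, if_pos hlt, hget]
  rfl

-- A's outer loop appends pvCollapse of the remaining slice
theorem pvTrimSpec : ∀ (fuel : Nat) (cs : List Char) (n i : Int) (out : List String),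
    (n - i).toNat ≤ fuel → 0 ≤ i → n ≤ (cs.length : Int) →
    pvTrimLoop cs n fuel i out = out ++ pvCollapse (pvRem cs n i) := by
  intro fuel
  induction fuel with
  | zero =>
    intro cs n i out hm h0 hlen
    have hni : ¬ i < n := by omega
    rw [pvTrimLoop, pvRem_nil cs n i h0 hni, pvCollapse_nil]
    simp
  | succ m ih =>
    intro cs n i out hm h0 hlen
    by_cases hlt : i < n
    · have hrem := pvRem_cons cs n i h0 hlt hlen
      have hget := pvGet_rem cs n i h0 hlt hlen
      set c := cs[i.toNat]'(by omega) with hc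
      rw [pvTrimLoop_some cs n i m out c hlt hget]
      by_cases hdash : c = '-'
      · -- dash run: the inner loop consumed d ≥ 1 dashes
        rw [dif_pos hdash]
        set L := ((pvRem cs n i).takeWhile (fun x => x == '-')) with hL
        set d := (L.length : Int) with hd
        have hp := pvDashSpec (m + 1) cs n i 0 hm h0 hlen
        have hp1 : (pvDashLoop cs n (m + 1) i 0).1 = d := by rw [hp]; show 0 + d = d; omega
        have hp2 : (pvDashLoop cs n (m + 1) i 0).2 = i + d := by rw [hp]
        have hL1 : L = c :: ((pvRem cs n (i + 1)).takeWhile (fun x => x == '-')) := by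
          rw [hL, hrem, List.takeWhile_cons_of_pos (by simp [hdash])]
        have hd1 : 1 ≤ d := by rw [hd, hL1]; simp only [List.length_cons]; omega
        have hremd : pvRem cs n (i + d)
            = (pvRem cs n (i + 1)).dropWhile (fun x => x == '-') := by
          have h1 : pvRem cs n (i + d) = (pvRem cs n (i + 1)).drop (d.toNat - 1) := by
            unfold pvRem
            rw [List.drop_drop]
            congr 1
            omega
          rw [h1, pvDropWhile_eq_drop]
          congr 1
          have : L.length = ((pvRem cs n (i + 1)).takeWhile (fun x => x == '-')).length + 1 := by
            rw [hL1]; simp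
          omega
        rw [hp1, hp2, ih cs n (i + d) _ (by omega) (by omega) hlen, hremd]
        conv_rhs => rw [hrem, pvCollapse_cons, if_pos hdash]
        have hdlen : d = (((pvRem cs n (i + 1)).takeWhile (fun x => x == '-')).length : Int) + 1 := by
          rw [hd, hL1]; simp only [List.length_cons]; push_cast; omega
        by_cases h2 : ((pvRem cs n (i + 1)).takeWhile (fun x => x == '-')).length + 1 ≥ 2
        · rw [if_pos (by omega : d ≥ 2), if_pos h2]
          simp
        · -- single dash: A appends s[i + d - 1] = the dash itself
          rw [if_neg (by omega : ¬ d ≥ 2), if_neg h2]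
          have harg : i + d - 1 = i := by omega
          rw [harg, hget, hdash]
          simp
          decide
      · rw [dif_neg hdash, ih cs n (i + 1) _ (by omega) (by omega) hlen]
        conv_rhs => rw [hrem, pvCollapse_cons, if_neg hdash]
        simp
    · rw [pvTrimLoop, if_neg hlt, pvRem_nil cs n i h0 hlt, pvCollapse_nil]
      simp

theorem trim_bar_spec : Claim_equal_trim_bar := by
  intro s n _ hpre
  unfold Spec_trim_bar
  have hA : trim_bar s n = pvCollapse (pvRem s.toList n 0) :=
    pvTrimSpec n.toNat s.toList n 0 [] (by omega) le_rfl hpre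
  rw [hA, pvAltEq s n hpre]
  unfold pvRem
  simp
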